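-- pv_equiv track=rewrite | github.com/huangyingw/submissions | 1177/1177.can-make-palindrome-from-substring.260921965.Accepted.leetcode.py | canMakePaliQueries
-- ===== SOURCE A (Python) =====
-- def canMakePaliQueries(s, queries):
--     char_odd_bits = [0]
--     for c in s:
--         char_odd_bits.append(char_odd_bits[-1] ^ (1 << ord(c) - ord("a")))
--     result = []
--     for left, right, k in queries:
--         left_odd_bits = char_odd_bits[left]
--         right_odd_bits = char_odd_bits[right + 1]
--         odd_chars = bin(left_odd_bits ^ right_odd_bits).count("1")
--         odd_chars -= (right - left + 1) % 2
--         odd_chars -= 2 * k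
--         result.append(odd_chars <= 0)
--     return result
-- ===== SOURCE B (Python) =====
-- def canMakePaliQueries(s, queries):
--     # Offline single sweep: bucket each query's two boundary prefix indices,
--     # sweep s once maintaining the set of letters seen an odd number of times,
--     # snapshot that set only at bucketed positions, then answer each query from
--     # the symmetric difference of its two snapshots (no prefix table is stored).
--     n = len(s)
--     need = [[] for _ in range(n + 1)]
--     for qi, (left, right, k) in enumerate(queries):
--         need[left].append((qi, 0))
--         need[right + 1].append((qi, 1))
--     snaps = [[None, None] for _ in queries]
--     odd = set()
--     for i in range(n + 1):
--         for qi, side in need[i]: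
--             snaps[qi][side] = set(odd)
--         if i < n:
--             c = s[i]
--             if c in odd:
--                 odd.remove(c)
--             else:
--                 odd.add(c)
--     result = []
--     for (left, right, k), (lo, hi) in zip(queries, snaps):
--         result.append(len(lo ^ hi) - (right - left + 1) % 2 - 2 * k <= 0)
--     return result
-- ===== Notes on version B (the rewrite author's own statement) =====
-- stated objective: alternative
-- what changed: Replaces A's precomputed prefix-XOR-bitmask table queried online per query with an offline single sweep: queries are first bucketed by their two boundary prefix indices, one pass over s toggles a set of odd-count letters and snapshots it only at bucketed positions, and each answer is read off the symmetric difference of its two snapshots (no prefix table, no bit arithmetic).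
import Mathlib
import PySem

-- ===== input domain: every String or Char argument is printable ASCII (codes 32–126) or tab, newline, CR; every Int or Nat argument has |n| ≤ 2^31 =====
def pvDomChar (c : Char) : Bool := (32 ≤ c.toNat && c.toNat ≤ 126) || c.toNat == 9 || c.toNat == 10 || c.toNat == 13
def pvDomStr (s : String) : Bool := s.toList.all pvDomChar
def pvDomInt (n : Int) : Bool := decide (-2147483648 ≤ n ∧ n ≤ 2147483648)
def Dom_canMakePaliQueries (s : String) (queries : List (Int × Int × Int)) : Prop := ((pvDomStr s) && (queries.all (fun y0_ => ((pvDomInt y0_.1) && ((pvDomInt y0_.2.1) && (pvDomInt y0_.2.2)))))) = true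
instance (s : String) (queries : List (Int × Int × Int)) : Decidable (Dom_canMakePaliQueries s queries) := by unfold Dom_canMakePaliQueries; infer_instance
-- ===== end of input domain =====

-- B answers the queries OFFLINE: it buckets each query's two boundary prefix indices,
-- makes one sweep over s toggling a set of odd-count letters, snapshots that set only at
-- bucketed positions, and reads each answer off the symmetric difference of two snapshots
-- (no prefix table, no bit arithmetic). Alternative structure; same exact results.

-- ===== PORT A =====
-- 1 << d; Python raises ValueError for d < 0 (those inputs are excluded by Pre_, junk value 0 there)
def pvShift (d : Int) : Nat := if d < 0 then 0 else 1 <<< d.toNat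

def canMakePaliQueries (s : String) (queries : List (Int × Int × Int)) : List Bool :=
  let charOddBits : List Nat := s.toList.foldl
    (fun acc c => acc ++ [((PySem.List.pyGet? acc (-1)).getD 0) ^^^ pvShift ((c.toNat : Int) - ('a'.toNat : Int))])
    [0]
  queries.foldl
    (fun result q =>
      let left := q.1
      let right := q.2.1
      let k := q.2.2
      -- char_odd_bits[left] / char_odd_bits[right+1]: IndexError (= none) excluded by Pre_
      let leftOddBits := (PySem.List.pyGet? charOddBits left).getD 0
      let rightOddBits := (PySem.List.pyGet? charOddBits (right + 1)).getD 0
      -- bin(x).count("1") on these nonnegative ints is the prelude's popcount primitive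
      let oddChars : Int := (PySem.Int.bitCount ((leftOddBits ^^^ rightOddBits : Nat) : Int) : Int)
      let oddChars := oddChars - PySem.Int.mod (right - left + 1) 2
      let oddChars := oddChars - 2 * k
      result ++ [decide (oddChars ≤ 0)])
    []

-- ===== PORT B =====
-- need[idx].append(x): Python list index assignment (negative index wraps; out of range =
-- IndexError, excluded by Pre_; pySetD/pyGetD are exact there and leave the list unchanged outside)
def pvAppendAt (need : List (List (Int × Nat))) (idx : Int) (x : Int × Nat) : List (List (Int × Nat)) :=
  PySem.List.pySetD need idx (PySem.List.pyGetD need idx [] ++ [x])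

-- snaps[qi][side] = set(odd): the two-slot [None, None] row is ported as a pair of Options
def pvWrite (snaps : List (Option (PySem.Set Char) × Option (PySem.Set Char))) (qi : Int)
    (side : Nat) (odd : PySem.Set Char) : List (Option (PySem.Set Char) × Option (PySem.Set Char)) :=
  let p := PySem.List.pyGetD snaps qi (none, none)
  PySem.List.pySetD snaps qi (if side = 0 then (some odd, p.2) else (p.1, some odd))

def canMakePaliQueries_alt (s : String) (queries : List (Int × Int × Int)) : List Bool :=
  let n := s.toList.length
  let need := (PySem.List.enumerate queries 0).foldl
    (fun need e => pvAppendAt (pvAppendAt need e.2.1 (e.1, 0)) (e.2.2.1 + 1) (e.1, 1))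
    (List.replicate (n + 1) ([] : List (Int × Nat)))
  let snaps0 : List (Option (PySem.Set Char) × Option (PySem.Set Char)) :=
    List.replicate queries.length (none, none)
  let final := (List.range (n + 1)).foldl
    (fun st i =>
      -- for qi, side in need[i]: snaps[qi][side] = set(odd)   (i from range(n+1) is in range)
      let snaps := (need.getD i []).foldl (fun snaps e => pvWrite snaps e.1 e.2 st.2) st.1
      -- if i < n: toggle s[i] in odd   (odd.remove on a member = discard)
      let odd := if i < n then
          (let c := s.toList.getD i ' '
           if PySem.Set.contains st.2 c then PySem.Set.discard st.2 c else PySem.Set.add st.2 c)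
        else st.2
      (snaps, odd))
    (snaps0, PySem.Set.empty)
  (queries.zip final.1).foldl
    (fun result x =>
      result ++ [decide ((PySem.Set.len (PySem.Set.symmDiff (x.2.1.getD PySem.Set.empty)
          (x.2.2.getD PySem.Set.empty)) : Int)
        - PySem.Int.mod (x.1.2.1 - x.1.1 + 1) 2 - 2 * x.1.2.2 ≤ 0)]) []

-- ===== PRECONDITION & SPEC =====
-- Pre_ = exactly the inputs where the Python A returns: every character at least 'a'
-- (ord(c)-ord('a') < 0 makes 1 << … raise ValueError) and every query's two prefix
-- indices inside Python range for the length-(n+1) prefix list (else IndexError),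
-- i.e. in [-(n+1), n] in Python's negative-wrapping index convention.
def Pre_canMakePaliQueries (s : String) (queries : List (Int × Int × Int)) : Prop :=
  ((s.toList.all fun c => decide (97 ≤ c.toNat)) &&
    (queries.all fun q =>
      (decide (-((s.toList.length : Int) + 1) ≤ q.1) && decide (q.1 ≤ (s.toList.length : Int))) &&
      (decide (-((s.toList.length : Int) + 1) ≤ q.2.1 + 1) &&
        decide (q.2.1 + 1 ≤ (s.toList.length : Int))))) = true
instance (s : String) (queries : List (Int × Int × Int)) : Decidable (Pre_canMakePaliQueries s queries) := by unfold Pre_canMakePaliQueries; infer_instance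

def pvWitness_canMakePaliQueries : String × (List (Int × Int × Int)) := ("abcb", [(1, 3, 0), (0, 3, 1), (-2, 2, 0)])

def Spec_canMakePaliQueries (s : String) (queries : List (Int × Int × Int)) (out : List Bool) : Prop := out = canMakePaliQueries_alt s queries
instance (s : String) (queries : List (Int × Int × Int)) (out : List Bool) : Decidable (Spec_canMakePaliQueries s queries out) := by unfold Spec_canMakePaliQueries; infer_instance

-- ===== CLAIM (what is proved, stated in full; the proofs are below) =====
def Claim_equal_canMakePaliQueries : Prop := ∀ (s : String) (queries : List (Int × Int × Int)), Dom_canMakePaliQueries s queries → Pre_canMakePaliQueries s queries → Spec_canMakePaliQueries s queries (canMakePaliQueries s queries)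

-- ===== LEMMAS AND PROOFS =====

-- Python's wrapped index into a length-(len+1) list, for the in-range case
def pvWrap (len : Nat) (i : Int) : Nat := (if i < 0 then i + ((len : Int) + 1) else i).toNat

-- A's parity bitmask of a character prefix
def pvMask (cs : List Char) : Nat :=
  cs.foldl (fun m c => m ^^^ pvShift ((c.toNat : Int) - ('a'.toNat : Int))) 0

-- B's set of odd-count letters of a character prefix
def pvOdd (cs : List Char) : PySem.Set Char :=
  cs.foldl (fun st c => if PySem.Set.contains st c then PySem.Set.discard st c else PySem.Set.add st c)
    PySem.Set.empty

-- correspondence between a bitmask and an odd-letter set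
def PvRel (m : Nat) (st : PySem.Set Char) : Prop :=
  m < 2 ^ 30 ∧ st.Nodup ∧ (∀ c ∈ st, 97 ≤ c.toNat ∧ c.toNat ≤ 126) ∧
    (∀ j : Nat, j < 30 → (m.testBit j = true ↔ ∃ c ∈ st, c.toNat = j + 97))

-- the ordered event list (bucket index, query index, side) of the bucketing phase
def pvEvs (len : Nat) (queries : List (Int × Int × Int)) : List (Nat × Int × Nat) :=
  (PySem.List.enumerate queries 0).flatMap
    (fun e => [(pvWrap len e.2.1, e.1, 0), (pvWrap len (e.2.2.1 + 1), e.1, 1)])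

lemma pv_foldl_scanl {α β : Type} (f : α → β → α) (d : α) :
    ∀ (cs : List β) (pre : List α) (x : α),
      List.foldl (fun a c => a ++ [f ((PySem.List.pyGet? a (-1)).getD d) c]) (pre ++ [x]) cs
        = pre ++ List.scanl f x cs := by
  intro cs
  induction cs with
  | nil => intro pre x; simp
  | cons c cs ih =>
    intro pre x
    simp only [List.foldl_cons, PySem.List.pyGet?_neg_one_append_singleton, Option.getD_some]
    rw [ih (pre ++ [x]) (f x c), List.scanl_cons, List.append_assoc, List.singleton_append]

lemma pv_scanl_getElem? {α β : Type} (f : α → β → α) :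
    ∀ (l : List β) (a : α) (i : Nat), i ≤ l.length →
      (List.scanl f a l)[i]? = some (List.foldl f a (l.take i)) := by
  intro l
  induction l with
  | nil =>
    intro a i hi
    have : i = 0 := by simpa using hi
    subst this
    simp [List.scanl]
  | cons c cs ih =>
    intro a i hi
    cases i with
    | zero => simp [List.scanl_cons]
    | succ i =>
      rw [List.scanl_cons]
      simpa using ih (f a c) i (by simpa using hi)

lemma pv_pyGet_idx {α : Type} (xs : List α) (i : Int)
    (hl : -(xs.length : Int) ≤ i) (_hr : i < (xs.length : Int)) :
    PySem.List.pyGet? xs i = xs[(if i < 0 then i + xs.length else i).toNat]? := by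
  rcases lt_or_ge i 0 with hi | hi
  · rw [if_pos hi]
    have hk1 : 0 < (-i).toNat := by omega
    have hk2 : (-i).toNat ≤ xs.length := by omega
    have hi' : i = -(((-i).toNat : Nat) : Int) := by omega
    rw [hi', PySem.List.pyGet?_neg_natCast xs _ hk1 hk2]
    congr 1
    omega
  · rw [if_neg (by omega), PySem.List.pyGet?_of_nonneg xs hi]

lemma pv_bitCount_countP : ∀ (k m : Nat), m < 2 ^ k →
    PySem.Int.bitCount (m : Int) = (List.range k).countP (fun j => m.testBit j) := by
  intro k
  induction k with
  | zero =>
    intro m hm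
    have hm0 : m = 0 := by simpa using hm
    subst hm0
    simp [PySem.Int.bitCount_zero]
  | succ k ih =>
    intro m hm
    by_cases h0 : m = 0
    · subst h0
      simp [PySem.Int.bitCount_zero, Nat.zero_testBit]
    · have h0' : 0 < m := Nat.pos_of_ne_zero h0
      rw [PySem.Int.bitCount_natCast h0']
      rw [List.range_succ_eq_map]
      simp only [List.countP_cons, List.countP_map, Function.comp_def, Nat.succ_eq_add_one,
        Nat.testBit_add_one, Nat.testBit_zero]
      have hdiv : m / 2 < 2 ^ k := by
        have : 2 ^ (k + 1) = 2 ^ k * 2 := by ring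
        omega
      rw [ih (m / 2) hdiv]
      by_cases hp : m % 2 = 1 <;> simp [hp] <;> omega

lemma pv_char_eq {c d : Char} (h : c.toNat = d.toNat) : c = d :=
  Char.ext (UInt32.toNat_inj.mp h)

lemma pv_rel_step (c : Char) (h1 : 97 ≤ c.toNat) (h2 : c.toNat ≤ 126) (m : Nat)
    (st : PySem.Set Char) (hr : PvRel m st) :
    PvRel (m ^^^ pvShift ((c.toNat : Int) - ('a'.toNat : Int)))
      (if PySem.Set.contains st c then PySem.Set.discard st c else PySem.Set.add st c) := by
  obtain ⟨hm, hnd, hbd, hbits⟩ := hr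
  have ha : ('a'.toNat : Int) = 97 := by decide
  have hshift : pvShift ((c.toNat : Int) - ('a'.toNat : Int)) = 2 ^ (c.toNat - 97) := by
    simp only [pvShift, ha]
    rw [if_neg (by omega), Nat.one_shiftLeft]
    congr 1
    omega
  set d : Nat := c.toNat - 97 with hd
  have hd30 : d < 30 := by omega
  have hcd : c.toNat = d + 97 := by omega
  rw [hshift]
  have hmlt : m ^^^ 2 ^ d < 2 ^ 30 :=
    Nat.xor_lt_two_pow hm (Nat.pow_lt_pow_right (by norm_num) hd30)
  by_cases hc : c ∈ st
  · rw [if_pos ((PySem.Set.contains_iff st c).mpr hc)]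
    refine ⟨hmlt, PySem.Set.nodup_discard st c hnd, ?_, ?_⟩
    · intro c' hc'
      exact hbd c' ((PySem.Set.mem_discard st c c').mp hc').1
    · intro j hj
      rw [Nat.testBit_xor, Nat.testBit_two_pow]
      by_cases hje : d = j
      · subst hje
        rw [(hbits d hd30).mpr ⟨c, hc, hcd⟩]
        simp only [decide_true, Bool.xor_true, Bool.not_true]
        constructor
        · intro h
          exact absurd h (by simp)
        · rintro ⟨c', hc', hce⟩
          have hcc : c' = c := pv_char_eq (by omega)
          exact absurd ((PySem.Set.mem_discard st c c').mp hc').2 (by simp [hcc])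
      · rw [decide_eq_false hje]
        simp only [Bool.xor_false]
        rw [hbits j hj]
        constructor
        · rintro ⟨c', hc', hce⟩
          refine ⟨c', (PySem.Set.mem_discard st c c').mpr ⟨hc', ?_⟩, hce⟩
          intro hcc
          subst hcc
          omega
        · rintro ⟨c', hc', hce⟩
          exact ⟨c', ((PySem.Set.mem_discard st c c').mp hc').1, hce⟩
  · rw [if_neg (by simp [hc])]
    refine ⟨hmlt, PySem.Set.nodup_add st c hnd, ?_, ?_⟩
    · intro c' hc'
      rcases (PySem.Set.mem_add st c c').mp hc' with h | h
      · exact hbd c' h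
      · subst h
        exact ⟨h1, h2⟩
    · intro j hj
      rw [Nat.testBit_xor, Nat.testBit_two_pow]
      by_cases hje : d = j
      · subst hje
        have hold : m.testBit d = false := by
          rw [Bool.eq_false_iff]
          intro h
          obtain ⟨c', hc', hce⟩ := (hbits d hd30).mp h
          have hcc : c' = c := pv_char_eq (by omega)
          exact hc (hcc ▸ hc')
        rw [hold]
        simp only [decide_true, Bool.xor_true, Bool.not_false]
        constructor
        · intro _
          exact ⟨c, (PySem.Set.mem_add st c c).mpr (Or.inr rfl), hcd⟩
        · intro _
          trivial
      · rw [decide_eq_false hje]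
        simp only [Bool.xor_false]
        rw [hbits j hj]
        constructor
        · rintro ⟨c', hc', hce⟩
          exact ⟨c', (PySem.Set.mem_add st c c').mpr (Or.inl hc'), hce⟩
        · rintro ⟨c', hc', hce⟩
          rcases (PySem.Set.mem_add st c c').mp hc' with h | h
          · exact ⟨c', h, hce⟩
          · subst h
            omega

lemma pv_rel_fold : ∀ (cs : List Char), (∀ c ∈ cs, 97 ≤ c.toNat ∧ c.toNat ≤ 126) →
    ∀ (m : Nat) (st : PySem.Set Char), PvRel m st →
      PvRel (cs.foldl (fun m c => m ^^^ pvShift ((c.toNat : Int) - ('a'.toNat : Int))) m)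
        (cs.foldl (fun st c =>
          if PySem.Set.contains st c then PySem.Set.discard st c else PySem.Set.add st c) st) := by
  intro cs
  induction cs with
  | nil => intro _ m st h; exact h
  | cons c cs ih =>
    intro hcs m st h
    have hcc := hcs c List.mem_cons_self
    exact ih (fun c' hc' => hcs c' (List.mem_cons_of_mem _ hc')) _ _
      (pv_rel_step c hcc.1 hcc.2 m st h)

lemma pv_rel_prefix (cs : List Char) (h : ∀ c ∈ cs, 97 ≤ c.toNat ∧ c.toNat ≤ 126) :
    PvRel (pvMask cs) (pvOdd cs) := by
  refine pv_rel_fold cs h 0 PySem.Set.empty ⟨by norm_num, by simp [PySem.Set.empty], ?_, ?_⟩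
  · intro c hc
    simp [PySem.Set.empty] at hc
  · intro j hj
    simp [Nat.zero_testBit, PySem.Set.empty]

lemma pv_count_eq (mA mB : Nat) (stA stB : PySem.Set Char)
    (hA : PvRel mA stA) (hB : PvRel mB stB) :
    ((PySem.Int.bitCount ((mA ^^^ mB : Nat) : Int) : Nat) : Int)
      = PySem.Set.len (PySem.Set.symmDiff stA stB) := by
  obtain ⟨hmA, hndA, hbdA, hbitsA⟩ := hA
  obtain ⟨hmB, hndB, hbdB, hbitsB⟩ := hB
  have hxor : mA ^^^ mB < 2 ^ 30 := Nat.xor_lt_two_pow hmA hmB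
  rw [pv_bitCount_countP 30 _ hxor]
  set L : PySem.Set Char := PySem.Set.symmDiff stA stB with hL
  have hmemL : ∀ c, c ∈ L ↔ (c ∈ stA ∧ c ∉ stB) ∨ (c ∈ stB ∧ c ∉ stA) := by
    intro c
    exact PySem.Set.mem_symmDiff stA stB c
  have hbdL : ∀ c ∈ L, 97 ≤ c.toNat ∧ c.toNat ≤ 126 := by
    intro c hc
    rcases (hmemL c).mp hc with h | h
    · exact hbdA c h.1
    · exact hbdB c h.1
  have hndL : L.Nodup := PySem.Set.nodup_symmDiff stA stB hndA hndB
  set M : List Nat := L.map (fun c => c.toNat - 97) with hM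
  have hndM : M.Nodup := by
    refine List.Nodup.map_on ?_ hndL
    intro x hx y hy hxy
    have hbx := hbdL x hx
    have hby := hbdL y hy
    exact pv_char_eq (by omega)
  set F : List Nat := (List.range 30).filter (fun j => (mA ^^^ mB).testBit j) with hF
  have hndF : F.Nodup := List.Nodup.filter _ (List.nodup_range)
  have hmem : ∀ j, j ∈ F ↔ j ∈ M := by
    intro j
    constructor
    · intro hj
      have hj' := List.mem_filter.mp hj
      have hj30 : j < 30 := List.mem_range.mp hj'.1
      have hbit : (mA ^^^ mB).testBit j = true := hj'.2
      rw [Nat.testBit_xor] at hbit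
      have hone : (mA.testBit j = true ∧ mB.testBit j = false) ∨
          (mB.testBit j = true ∧ mA.testBit j = false) := by
        cases h1 : mA.testBit j <;> cases h2 : mB.testBit j <;>
          simp [h1, h2] at hbit ⊢
      have hc : ∃ c ∈ L, c.toNat = j + 97 := by
        rcases hone with ⟨h1, h2⟩ | ⟨h1, h2⟩
        · obtain ⟨c, hc, hce⟩ := (hbitsA j hj30).mp h1
          refine ⟨c, (hmemL c).mpr (Or.inl ⟨hc, ?_⟩), hce⟩
          intro hcB
          have := (hbitsB j hj30).mpr ⟨c, hcB, hce⟩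
          rw [this] at h2
          cases h2
        · obtain ⟨c, hc, hce⟩ := (hbitsB j hj30).mp h1
          refine ⟨c, (hmemL c).mpr (Or.inr ⟨hc, ?_⟩), hce⟩
          intro hcA
          have := (hbitsA j hj30).mpr ⟨c, hcA, hce⟩
          rw [this] at h2
          cases h2
      obtain ⟨c, hc, hce⟩ := hc
      rw [hM]
      refine List.mem_map.mpr ⟨c, hc, by omega⟩
    · intro hj
      obtain ⟨c, hc, hce⟩ := List.mem_map.mp hj
      have hbc := hbdL c hc
      have hce' : c.toNat = j + 97 := by omega
      have hj30 : j < 30 := by omega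
      refine List.mem_filter.mpr ⟨List.mem_range.mpr hj30, ?_⟩
      rw [Nat.testBit_xor]
      rcases (hmemL c).mp hc with ⟨h1, h2⟩ | ⟨h1, h2⟩
      · have hA1 : mA.testBit j = true := (hbitsA j hj30).mpr ⟨c, h1, hce'⟩
        have hB1 : mB.testBit j = false := by
          rw [Bool.eq_false_iff]
          intro hb
          obtain ⟨c', hc', hce''⟩ := (hbitsB j hj30).mp hb
          have : c' = c := pv_char_eq (by omega)
          exact h2 (this ▸ hc')
        simp [hA1, hB1]
      · have hB1 : mB.testBit j = true := (hbitsB j hj30).mpr ⟨c, h1, hce'⟩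
        have hA1 : mA.testBit j = false := by
          rw [Bool.eq_false_iff]
          intro hb
          obtain ⟨c', hc', hce''⟩ := (hbitsA j hj30).mp hb
          have : c' = c := pv_char_eq (by omega)
          exact h2 (this ▸ hc')
        simp [hA1, hB1]
  have hperm : F.Perm M := (List.perm_ext_iff_of_nodup hndF hndM).mpr hmem
  have hlenM : M.length = L.length := by simp [hM]
  rw [List.countP_eq_length_filter, ← hF, hperm.length_eq, hlenM]
  simp [PySem.Set.len]

-- Python's wrapped index, in closed form, for in-range indices
lemma pv_pyIdx_inrange (n : Nat) (i : Int) (h1 : -(n : Int) ≤ i) (h2 : i < (n : Int)) :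
    PySem.List.pyIdx? n i = some ((if i < 0 then i + n else i).toNat) := by
  simp only [PySem.List.pyIdx?]
  by_cases h0 : 0 ≤ i
  · rw [if_pos h0, if_pos h2, if_neg (by omega)]
  · rw [if_neg h0, if_pos (by omega), if_pos (by omega)]
    congr 1
    omega

lemma pv_pySetD_inrange {α : Type} (xs : List α) (i : Int) (v : α)
    (h1 : -(xs.length : Int) ≤ i) (h2 : i < (xs.length : Int)) :
    PySem.List.pySetD xs i v = xs.set ((if i < 0 then i + xs.length else i).toNat) v := by
  simp only [PySem.List.pySetD, PySem.List.pySet?, pv_pyIdx_inrange xs.length i h1 h2,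
    Option.map_some, Option.getD_some]

lemma pv_pyGetD_inrange {α : Type} (xs : List α) (i : Int) (d : α)
    (h1 : -(xs.length : Int) ≤ i) (h2 : i < (xs.length : Int)) :
    PySem.List.pyGetD xs i d = xs.getD ((if i < 0 then i + xs.length else i).toNat) d := by
  simp only [PySem.List.pyGetD, pv_pyGet_idx xs i h1 h2, List.getD_eq_getElem?_getD]

-- in-range condition of a query index for the length-(n+1) prefix list
def PvInR (n : Nat) (i : Int) : Prop := -((n : Int) + 1) ≤ i ∧ i ≤ (n : Int)

lemma pv_wrap_le (n : Nat) (i : Int) (h : PvInR n i) : pvWrap n i ≤ n := by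
  obtain ⟨h1, h2⟩ := h
  simp only [pvWrap]
  split_ifs <;> omega

lemma pv_appendAt_inrange (need : List (List (Int × Nat))) (idx : Int) (x : Int × Nat)
    (n : Nat) (hlen : need.length = n + 1) (h : PvInR n idx) :
    pvAppendAt need idx x
      = need.set (pvWrap n idx) (need.getD (pvWrap n idx) [] ++ [x]) := by
  obtain ⟨h1, h2⟩ := h
  have hl : -(need.length : Int) ≤ idx := by rw [hlen]; push_cast; omega
  have hr : idx < (need.length : Int) := by rw [hlen]; push_cast; omega
  have hw : (if idx < 0 then idx + need.length else idx).toNat = pvWrap n idx := by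
    simp only [pvWrap, hlen]
    split_ifs <;> push_cast <;> omega
  rw [pvAppendAt, pv_pySetD_inrange need idx _ hl hr, pv_pyGetD_inrange need idx [] hl hr, hw]

lemma pv_set_getD {α : Type} (xs : List α) (w j : Nat) (v d : α) (hw : w < xs.length) :
    (xs.set w v).getD j d = if j = w then v else xs.getD j d := by
  by_cases hj : j = w
  · subst hj
    simp [List.getD_eq_getElem?_getD, List.getElem?_set_self hw]
  · simp [List.getD_eq_getElem?_getD, List.getElem?_set_ne (fun h => hj h.symm), hj]

lemma pv_need_spec (n : Nat) : ∀ (L : List (Int × Int × Int)) (st : Int) (need0 : List (List (Int × Nat))),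
    need0.length = n + 1 →
    (∀ q ∈ L, PvInR n q.1 ∧ PvInR n (q.2.1 + 1)) →
    ∀ j : Nat,
      ((PySem.List.enumerate L st).foldl
          (fun need e => pvAppendAt (pvAppendAt need e.2.1 (e.1, 0)) (e.2.2.1 + 1) (e.1, 1)) need0).getD j []
        = need0.getD j []
          ++ (((PySem.List.enumerate L st).flatMap
                (fun e => [(pvWrap n e.2.1, e.1, 0), (pvWrap n (e.2.2.1 + 1), e.1, 1)])).filter
                (fun t => decide (t.1 = j))).map (fun t => t.2) := by
  intro L
  induction L with
  | nil => intro st need0 _ _ j; simp [PySem.List.enumerate_nil]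
  | cons q L ih =>
    intro st need0 hlen hq j
    have hq1 := (hq q List.mem_cons_self).1
    have hq2 := (hq q List.mem_cons_self).2
    rw [PySem.List.enumerate_cons, List.foldl_cons]
    set w1 := pvWrap n q.1 with hw1
    set w2 := pvWrap n (q.2.1 + 1) with hw2
    have hw1n : w1 < need0.length := by rw [hlen]; exact Nat.lt_succ_of_le (pv_wrap_le n _ hq1)
    have hw2n : w2 < need0.length := by rw [hlen]; exact Nat.lt_succ_of_le (pv_wrap_le n _ hq2)
    set need0a := need0.set w1 (need0.getD w1 [] ++ [(st, 0)]) with hneed0a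
    have hstep : pvAppendAt (pvAppendAt need0 q.1 (st, 0)) (q.2.1 + 1) (st, 1)
        = need0a.set w2 (need0a.getD w2 [] ++ [(st, 1)]) := by
      rw [pv_appendAt_inrange need0 q.1 (st, 0) n hlen hq1]
      rw [pv_appendAt_inrange need0a (q.2.1 + 1) (st, 1) n (by simp [hneed0a, hlen]) hq2]
    rw [hstep]
    rw [ih (st + 1) _ (by simp [hneed0a, hlen]) (fun q' hq' => hq q' (List.mem_cons_of_mem _ hq')) j]
    have hw2a : w2 < need0a.length := by simp [hneed0a]; omega
    have hgoal : (need0a.set w2 (need0a.getD w2 [] ++ [((st : Int), (1 : Nat))])).getD j []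
        = need0.getD j [] ++ ((if w1 = j then [((st : Int), (0 : Nat))] else [])
            ++ (if w2 = j then [((st : Int), (1 : Nat))] else [])) := by
      rw [pv_set_getD _ w2 j _ [] hw2a]
      rw [hneed0a, pv_set_getD _ w1 j _ [] hw1n, pv_set_getD _ w1 w2 _ [] hw1n]
      by_cases hj2 : j = w2 <;> by_cases hj1 : j = w1
      · rw [if_pos hj2, if_pos (by omega : w2 = w1), if_pos (by omega : w1 = j),
          if_pos (by omega : w2 = j), hj1]
        simp
      · rw [if_pos hj2, if_neg (by omega : ¬ w2 = w1), if_neg (by omega : ¬ w1 = j),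
          if_pos (by omega : w2 = j), hj2]
        simp
      · rw [if_neg hj2, if_pos hj1, if_pos (by omega : w1 = j), if_neg (by omega : ¬ w2 = j), hj1]
        simp
      · rw [if_neg hj2, if_neg hj1, if_neg (by omega : ¬ w1 = j), if_neg (by omega : ¬ w2 = j)]
        simp
    rw [hgoal, List.append_assoc]
    congr 1
    simp only [List.flatMap_cons, List.cons_append, List.nil_append, List.filter_cons,
      List.filter_append, List.map_append]
    by_cases hj1 : w1 = j <;> by_cases hj2 : w2 = j <;>
      simp [← hw1, ← hw2, hj1, hj2]

-- one pvWrite, observed through getD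
lemma pv_write_getD (snaps : List (Option (PySem.Set Char) × Option (PySem.Set Char)))
    (qi : Int) (side : Nat) (odd : PySem.Set Char) (h0 : 0 ≤ qi) (h1 : qi < (snaps.length : Int)) :
    (pvWrite snaps qi side odd).length = snaps.length ∧
    ∀ qj : Nat, (pvWrite snaps qi side odd).getD qj (none, none)
      = if (qj : Int) = qi then
          (if side = 0 then (some odd, (snaps.getD qj (none, none)).2)
           else ((snaps.getD qj (none, none)).1, some odd))
        else snaps.getD qj (none, none) := by
  have hset : pvWrite snaps qi side odd
      = snaps.set qi.toNat
          (if side = 0 then (some odd, (snaps.getD qi.toNat (none, none)).2)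
           else ((snaps.getD qi.toNat (none, none)).1, some odd)) := by
    simp only [pvWrite, PySem.List.pySetD_of_nonneg snaps _ h0,
      PySem.List.pyGetD_of_nonneg snaps _ h0]
  constructor
  · rw [hset]
    simp
  · intro qj
    rw [hset, pv_set_getD _ qi.toNat qj _ _ (by omega)]
    by_cases hj : qj = qi.toNat
    · subst hj
      rw [if_pos rfl, if_pos (show ((qi.toNat : Int) = qi) from by omega)]
    · rw [if_neg hj, if_neg (show ¬ ((qj : Int) = qi) from by omega)]

lemma pv_write_fold (odd : PySem.Set Char) :
    ∀ (evs : List (Int × Nat)) (snaps : List (Option (PySem.Set Char) × Option (PySem.Set Char))),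
    (∀ e ∈ evs, 0 ≤ e.1 ∧ e.1 < (snaps.length : Int) ∧ (e.2 = 0 ∨ e.2 = 1)) →
    ((evs.foldl (fun sn e => pvWrite sn e.1 e.2 odd) snaps).length = snaps.length) ∧
    ∀ qj : Nat,
      (evs.foldl (fun sn e => pvWrite sn e.1 e.2 odd) snaps).getD qj (none, none)
        = ((if ((qj : Int), (0 : Nat)) ∈ evs then some odd else (snaps.getD qj (none, none)).1),
           (if ((qj : Int), (1 : Nat)) ∈ evs then some odd else (snaps.getD qj (none, none)).2)) := by
  intro evs
  induction evs with
  | nil => intro snaps _; simp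
  | cons e evs ih =>
    intro snaps hh
    obtain ⟨e1, e2⟩ := e
    have he := hh (e1, e2) List.mem_cons_self
    obtain ⟨hw_len, hw_get⟩ := pv_write_getD snaps e1 e2 odd he.1 he.2.1
    have hh' : ∀ e' ∈ evs, 0 ≤ e'.1 ∧ e'.1 < ((pvWrite snaps e1 e2 odd).length : Int) ∧ (e'.2 = 0 ∨ e'.2 = 1) := by
      intro e' he'
      rw [hw_len]
      exact hh e' (List.mem_cons_of_mem _ he')
    obtain ⟨ih_len, ih_get⟩ := ih (pvWrite snaps e1 e2 odd) hh'
    constructor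
    · rw [List.foldl_cons, ih_len, hw_len]
    · intro qj
      rw [List.foldl_cons, ih_get qj, hw_get qj]
      rcases he.2.2 with hs | hs <;> subst hs <;>
        by_cases hin0 : ((qj : Int), (0 : Nat)) ∈ evs <;>
          by_cases hin1 : ((qj : Int), (1 : Nat)) ∈ evs <;>
            by_cases hq : (qj : Int) = e1 <;>
              simp [hin0, hin1, hq, List.mem_cons, Prod.ext_iff]

-- the outer sweep, as a named step function (definitionally the lambda in the B port)
def pvSweepStep (s : String) (need : List (List (Int × Nat)))
    (st : List (Option (PySem.Set Char) × Option (PySem.Set Char)) × PySem.Set Char)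
    (i : Nat) : List (Option (PySem.Set Char) × Option (PySem.Set Char)) × PySem.Set Char :=
  let snaps := (need.getD i []).foldl (fun snaps e => pvWrite snaps e.1 e.2 st.2) st.1
  let odd := if i < s.toList.length then
      (let c := s.toList.getD i ' '
       if PySem.Set.contains st.2 c then PySem.Set.discard st.2 c else PySem.Set.add st.2 c)
    else st.2
  (snaps, odd)

lemma pv_sweep (s : String) (queries : List (Int × Int × Int))
    (need : List (List (Int × Nat)))
    (hneed : ∀ j : Nat, need.getD j []
      = (((pvEvs s.toList.length queries).filter (fun t => decide (t.1 = j))).map (fun t => t.2)))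
    (hq : ∀ q ∈ queries, PvInR s.toList.length q.1 ∧ PvInR s.toList.length (q.2.1 + 1)) :
    ∀ m : Nat, m ≤ s.toList.length + 1 →
      ((List.range m).foldl (pvSweepStep s need)
          (List.replicate queries.length (none, none), PySem.Set.empty)).2
        = pvOdd (s.toList.take m) ∧
      ((List.range m).foldl (pvSweepStep s need)
          (List.replicate queries.length (none, none), PySem.Set.empty)).1.length
        = queries.length ∧
      ∀ (k : Nat), k < queries.length →
        ((List.range m).foldl (pvSweepStep s need)
            (List.replicate queries.length (none, none), PySem.Set.empty)).1.getD k (none, none)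
          = ((if pvWrap s.toList.length (queries.getD k (0, 0, 0)).1 < m
                then some (pvOdd (s.toList.take (pvWrap s.toList.length (queries.getD k (0, 0, 0)).1)))
                else none),
             (if pvWrap s.toList.length ((queries.getD k (0, 0, 0)).2.1 + 1) < m
                then some (pvOdd (s.toList.take (pvWrap s.toList.length ((queries.getD k (0, 0, 0)).2.1 + 1))))
                else none)) := by
  have hbucket : ∀ (i : Nat) (e : Int × Nat), e ∈ need.getD i [] ↔
      ∃ k : Nat, k < queries.length ∧ e.1 = (k : Int) ∧
        ((e.2 = 0 ∧ pvWrap s.toList.length (queries.getD k (0, 0, 0)).1 = i) ∨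
         (e.2 = 1 ∧ pvWrap s.toList.length ((queries.getD k (0, 0, 0)).2.1 + 1) = i)) := by
    intro i e
    rw [hneed i]
    simp only [List.mem_map, List.mem_filter, pvEvs, List.mem_flatMap,
      PySem.List.mem_enumerate_iff, decide_eq_true_eq]
    constructor
    · rintro ⟨t, ⟨⟨p, ⟨k, hk, hp⟩, hmem⟩, hti⟩, hte⟩
      subst hp
      simp only [List.mem_cons, List.mem_singleton, List.not_mem_nil, or_false] at hmem
      refine ⟨k, hk, ?_⟩
      rw [List.getD_eq_getElem _ _ hk]
      rcases hmem with h | h <;> subst h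
      · simp only at hti hte
        subst hte
        exact ⟨by simp, Or.inl ⟨rfl, hti⟩⟩
      · simp only at hti hte
        subst hte
        exact ⟨by simp, Or.inr ⟨rfl, hti⟩⟩
    · rintro ⟨k, hk, he1, hcase⟩
      obtain ⟨e1, e2⟩ := e
      simp only at he1
      subst he1
      rcases hcase with ⟨he2, hw⟩ | ⟨he2, hw⟩ <;> simp only at he2 <;> subst he2
      · refine ⟨(pvWrap s.toList.length (queries.getD k (0, 0, 0)).1, (k : Int), 0),
          ⟨⟨((k : Int), queries[k]), ⟨k, hk, by simp⟩, ?_⟩, by simpa using hw⟩, rfl⟩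
        rw [List.getD_eq_getElem _ _ hk]
        exact List.mem_cons_self
      · refine ⟨(pvWrap s.toList.length ((queries.getD k (0, 0, 0)).2.1 + 1), (k : Int), 1),
          ⟨⟨((k : Int), queries[k]), ⟨k, hk, by simp⟩, ?_⟩, by simpa using hw⟩, rfl⟩
        rw [List.getD_eq_getElem _ _ hk]
        exact List.mem_cons_of_mem _ List.mem_cons_self
  intro m
  induction m with
  | zero =>
    intro _
    refine ⟨rfl, by simp, ?_⟩
    intro k hk
    simp [List.getD_eq_getElem?_getD, List.getElem?_replicate, hk]
  | succ m ih =>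
    intro hm
    obtain ⟨ho, hl, hg⟩ := ih (by omega)
    rw [List.range_succ, List.foldl_append, List.foldl_cons, List.foldl_nil]
    set Fm := (List.range m).foldl (pvSweepStep s need)
      (List.replicate queries.length (none, none), PySem.Set.empty) with hFm
    have hpre : ∀ e ∈ need.getD m [], 0 ≤ e.1 ∧ e.1 < (Fm.1.length : Int) ∧ (e.2 = 0 ∨ e.2 = 1) := by
      intro e he
      obtain ⟨k, hk, he1, hcase⟩ := (hbucket m e).mp he
      refine ⟨by omega, by rw [hl]; omega, ?_⟩
      rcases hcase with ⟨h, _⟩ | ⟨h, _⟩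
      · exact Or.inl h
      · exact Or.inr h
    obtain ⟨hwlen, hwget⟩ := pv_write_fold Fm.2 (need.getD m []) Fm.1 hpre
    refine ⟨?_, ?_, ?_⟩
    · show (if m < s.toList.length then
          (let c := s.toList.getD m ' '
           if PySem.Set.contains Fm.2 c then PySem.Set.discard Fm.2 c else PySem.Set.add Fm.2 c)
        else Fm.2) = pvOdd (s.toList.take (m + 1))
      by_cases hmn : m < s.toList.length
      · rw [if_pos hmn]
        show (if PySem.Set.contains Fm.2 (s.toList.getD m ' ')
            then PySem.Set.discard Fm.2 (s.toList.getD m ' ')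
            else PySem.Set.add Fm.2 (s.toList.getD m ' ')) = pvOdd (s.toList.take (m + 1))
        rw [List.getD_eq_getElem _ _ hmn, ho]
        have htake : s.toList.take (m + 1) = s.toList.take m ++ [s.toList[m]] := by
          rw [List.take_succ, List.getElem?_eq_getElem hmn]
          rfl
        rw [htake]
        simp only [pvOdd, List.foldl_append, List.foldl_cons, List.foldl_nil]
      · rw [if_neg hmn, ho, List.take_of_length_le (by omega), List.take_of_length_le (by omega)]
    · show ((need.getD m []).foldl (fun snaps e => pvWrite snaps e.1 e.2 Fm.2) Fm.1).length
        = queries.length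
      rw [hwlen, hl]
    · intro k hk
      show ((need.getD m []).foldl (fun snaps e => pvWrite snaps e.1 e.2 Fm.2) Fm.1).getD k (none, none) = _
      rw [hwget k, hg k hk]
      have hmem0 : (((k : Int), (0 : Nat)) ∈ need.getD m [])
          ↔ pvWrap s.toList.length (queries.getD k (0, 0, 0)).1 = m := by
        rw [hbucket m ((k : Int), (0 : Nat))]
        constructor
        · rintro ⟨k', hk', hke, hcase⟩
          have hkk : k' = k := by simp only at hke; omega
          subst hkk
          rcases hcase with ⟨_, hw⟩ | ⟨hbad, _⟩
          · exact hw
          · simp at hbad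
        · intro hw
          exact ⟨k, hk, rfl, Or.inl ⟨rfl, hw⟩⟩
      have hmem1 : (((k : Int), (1 : Nat)) ∈ need.getD m [])
          ↔ pvWrap s.toList.length ((queries.getD k (0, 0, 0)).2.1 + 1) = m := by
        rw [hbucket m ((k : Int), (1 : Nat))]
        constructor
        · rintro ⟨k', hk', hke, hcase⟩
          have hkk : k' = k := by simp only at hke; omega
          subst hkk
          rcases hcase with ⟨hbad, _⟩ | ⟨_, hw⟩
          · simp at hbad
          · exact hw
        · intro hw
          exact ⟨k, hk, rfl, Or.inr ⟨rfl, hw⟩⟩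
      have hfst : (if ((k : Int), (0 : Nat)) ∈ need.getD m [] then some Fm.2
            else if pvWrap s.toList.length (queries.getD k (0, 0, 0)).1 < m
              then some (pvOdd (s.toList.take (pvWrap s.toList.length (queries.getD k (0, 0, 0)).1)))
              else none)
          = (if pvWrap s.toList.length (queries.getD k (0, 0, 0)).1 < m + 1
              then some (pvOdd (s.toList.take (pvWrap s.toList.length (queries.getD k (0, 0, 0)).1)))
              else none) := by
        by_cases hw : pvWrap s.toList.length (queries.getD k (0, 0, 0)).1 = m
        · rw [if_pos (hmem0.mpr hw), if_pos (by omega), hw, ho]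
        · rw [if_neg (fun h => hw (hmem0.mp h))]
          by_cases hlt : pvWrap s.toList.length (queries.getD k (0, 0, 0)).1 < m
          · rw [if_pos hlt, if_pos (by omega)]
          · rw [if_neg hlt, if_neg (by omega)]
      have hsnd : (if ((k : Int), (1 : Nat)) ∈ need.getD m [] then some Fm.2
            else if pvWrap s.toList.length ((queries.getD k (0, 0, 0)).2.1 + 1) < m
              then some (pvOdd (s.toList.take (pvWrap s.toList.length ((queries.getD k (0, 0, 0)).2.1 + 1))))
              else none)
          = (if pvWrap s.toList.length ((queries.getD k (0, 0, 0)).2.1 + 1) < m + 1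
              then some (pvOdd (s.toList.take (pvWrap s.toList.length ((queries.getD k (0, 0, 0)).2.1 + 1))))
              else none) := by
        by_cases hw : pvWrap s.toList.length ((queries.getD k (0, 0, 0)).2.1 + 1) = m
        · rw [if_pos (hmem1.mpr hw), if_pos (by omega), hw, ho]
        · rw [if_neg (fun h => hw (hmem1.mp h))]
          by_cases hlt : pvWrap s.toList.length ((queries.getD k (0, 0, 0)).2.1 + 1) < m
          · rw [if_pos hlt, if_pos (by omega)]
          · rw [if_neg hlt, if_neg (by omega)]
      rw [← hfst, ← hsnd]

-- ===== VERDICT (by name: the statement is the Claim_ definition above) =====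
theorem canMakePaliQueries_spec : Claim_equal_canMakePaliQueries := by
  intro s queries hdom hpre
  unfold Pre_canMakePaliQueries at hpre
  simp only [Bool.and_eq_true, List.all_eq_true, decide_eq_true_eq] at hpre
  obtain ⟨hchars, hq⟩ := hpre
  have hchars' : ∀ c ∈ s.toList, 97 ≤ c.toNat ∧ c.toNat ≤ 126 := by
    intro c hc
    refine ⟨hchars c hc, ?_⟩
    unfold Dom_canMakePaliQueries pvDomStr at hdom
    simp only [Bool.and_eq_true, List.all_eq_true] at hdom
    have h2 := hdom.1 c hc
    unfold pvDomChar at h2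
    simp only [Bool.or_eq_true, Bool.and_eq_true, decide_eq_true_eq, beq_iff_eq] at h2
    have h3 := hchars c hc
    omega
  have hqR : ∀ q ∈ queries, PvInR s.toList.length q.1 ∧ PvInR s.toList.length (q.2.1 + 1) := by
    intro q hq'
    obtain ⟨⟨a, b⟩, c, d⟩ := hq q hq'
    exact ⟨⟨by omega, by omega⟩, ⟨by omega, by omega⟩⟩
  unfold Spec_canMakePaliQueries
  set n := s.toList.length with hn
  set need := (PySem.List.enumerate queries 0).foldl
      (fun need e => pvAppendAt (pvAppendAt need e.2.1 (e.1, 0)) (e.2.2.1 + 1) (e.1, 1))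
      (List.replicate (n + 1) ([] : List (Int × Nat))) with hneeddef
  have halt : canMakePaliQueries_alt s queries
      = (queries.zip ((List.range (n + 1)).foldl (pvSweepStep s need)
          (List.replicate queries.length (none, none), PySem.Set.empty)).1).foldl
          (fun result x =>
            result ++ [decide ((PySem.Set.len (PySem.Set.symmDiff (x.2.1.getD PySem.Set.empty)
                (x.2.2.getD PySem.Set.empty)) : Int)
              - PySem.Int.mod (x.1.2.1 - x.1.1 + 1) 2 - 2 * x.1.2.2 ≤ 0)]) [] := rfl
  have hneed : ∀ j : Nat, need.getD j []
      = (((pvEvs n queries).filter (fun t => decide (t.1 = j))).map (fun t => t.2)) := by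
    intro j
    rw [hneeddef, pv_need_spec n queries 0 _ (by simp) hqR j]
    have hrep : (List.replicate (n + 1) ([] : List (Int × Nat))).getD j [] = [] := by
      by_cases h : j < n + 1 <;> simp [List.getD_eq_getElem?_getD, List.getElem?_replicate, h]
    rw [hrep, List.nil_append]
    rfl
  obtain ⟨hov, hlv, hgv⟩ := pv_sweep s queries need hneed hqR (n + 1) le_rfl
  rw [halt]
  simp only [canMakePaliQueries]
  have hbits := pv_foldl_scanl
    (fun (m : Nat) (c : Char) => m ^^^ pvShift ((c.toNat : Int) - ('a'.toNat : Int))) 0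
    s.toList [] 0
  simp only [List.nil_append] at hbits
  rw [hbits]
  rw [PySem.List.foldl_append_singleton_eq_map, PySem.List.foldl_append_singleton_eq_map,
    List.nil_append, List.nil_append]
  have hlenscan : (List.scanl
      (fun (m : Nat) (c : Char) => m ^^^ pvShift ((c.toNat : Int) - ('a'.toNat : Int))) 0
      s.toList).length = n + 1 := by
    rw [List.length_scanl]
  apply List.ext_getElem
  · simp only [List.length_map, List.length_zip, hlv, Nat.min_self]
  intro k h1 h2
  have hk : k < queries.length := by simpa using h1
  simp only [List.getElem_map, List.getElem_zip]
  have hkq : queries.getD k (0, 0, 0) = queries[k] := List.getD_eq_getElem _ _ hk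
  obtain ⟨hR1, hR2⟩ := hqR queries[k] (List.getElem_mem hk)
  have hw1 : pvWrap n queries[k].1 ≤ n := pv_wrap_le n _ hR1
  have hw2 : pvWrap n (queries[k].2.1 + 1) ≤ n := pv_wrap_le n _ hR2
  have hsnap := hgv k hk
  rw [hkq] at hsnap
  simp only [← hn] at hsnap
  rw [if_pos (by omega), if_pos (by omega)] at hsnap
  have hklen : k < ((List.range (n + 1)).foldl (pvSweepStep s need)
      (List.replicate queries.length (none, none), PySem.Set.empty)).1.length := by
    rw [hlv]; exact hk
  have hsnap' : ((List.range (n + 1)).foldl (pvSweepStep s need)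
      (List.replicate queries.length (none, none), PySem.Set.empty)).1[k]
      = (some (pvOdd (s.toList.take (pvWrap n queries[k].1))),
         some (pvOdd (s.toList.take (pvWrap n (queries[k].2.1 + 1))))) := by
    rw [← List.getD_eq_getElem _ (none, none) hklen]
    exact hsnap
  rw [hsnap']
  -- the two pyGet? lookups of A
  have hidx : ∀ (i : Int), PvInR n i →
      PySem.List.pyGet? (List.scanl
        (fun (m : Nat) (c : Char) => m ^^^ pvShift ((c.toNat : Int) - ('a'.toNat : Int))) 0
        s.toList) i = some (pvMask (s.toList.take (pvWrap n i))) := by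
    intro i hi
    obtain ⟨hi1, hi2⟩ := hi
    rw [pv_pyGet_idx _ i (by rw [hlenscan]; push_cast; omega) (by rw [hlenscan]; push_cast; omega)]
    have hweq : (if i < 0 then i + (List.scanl
        (fun (m : Nat) (c : Char) => m ^^^ pvShift ((c.toNat : Int) - ('a'.toNat : Int))) 0
        s.toList).length else i).toNat = pvWrap n i := by
      rw [hlenscan]
      simp only [pvWrap]
      split_ifs <;> push_cast <;> omega
    rw [hweq, pv_scanl_getElem? _ s.toList 0 (pvWrap n i) (by omega)]
    rfl
  rw [hidx queries[k].1 hR1, hidx (queries[k].2.1 + 1) hR2]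
  simp only [Option.getD_some]
  -- counts agree via the bitmask/odd-set correspondence
  have hrel : ∀ w : Nat, PvRel (pvMask (s.toList.take w)) (pvOdd (s.toList.take w)) := by
    intro w
    exact pv_rel_prefix _ (fun c hc => hchars' c (List.mem_of_mem_take hc))
  have hcnt := pv_count_eq _ _ _ _ (hrel (pvWrap n queries[k].1)) (hrel (pvWrap n (queries[k].2.1 + 1)))
  simp only [hcnt]
  rfl
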